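-- pv_equiv track=rewrite | github.com/do0134/solostudy | algorithm/2023/11월/1107/2sol.py | solution
-- ===== SOURCE A (Python) =====
-- from collections import deque
--
-- def solution(maps):
--     answer = []
--     dr = [1, -1, 0, 0]
--     dc = [0, 0, 1, -1]
--     v = [[0] * len(maps[0]) for _ in range(len(maps))]
--     q = deque()
--     n = len(maps)
--     m = len(maps[0])
--
--     for i in range(n):
--         for j in range(m):
--             if not v[i][j] and maps[i][j] != "X":
--                 value = int(maps[i][j])
--                 q.append((i, j))
--                 v[i][j] = 1
--                 while q:
--                     cr, cc = q.popleft()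
--                     for d in range(4):
--                         nr, nc = dr[d] + cr, dc[d] + cc
--                         if 0 <= nr < n and 0 <= nc < m and not v[nr][nc] and maps[nr][nc] != "X":
--                             value += int(maps[nr][nc])
--                             v[nr][nc] = 1
--                             q.append((nr, nc))
--
--                 answer.append(value)
--
--     if not answer:
--         answer.append(-1)
--     return sorted(answer)
-- ===== SOURCE B (Python) =====
-- def solution(maps):
--     n = len(maps)
--     m = len(maps[0])
--     visited = set()
--     sums = []
--     for i in range(n):
--         for j in range(m):
--             if (i, j) not in visited and maps[i][j] != "X":
--                 comp = {(i, j)}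
--                 for _ in range(n * m):
--                     grown = set(comp)
--                     for (r, c) in comp:
--                         for p in ((r + 1, c), (r - 1, c), (r, c + 1), (r, c - 1)):
--                             if (0 <= p[0] < n and 0 <= p[1] < m
--                                     and p not in visited and p not in comp
--                                     and maps[p[0]][p[1]] != "X"):
--                                 grown.add(p)
--                     if grown == comp:
--                         break
--                     comp = grown
--                 visited |= comp
--                 sums.append(sum(int(maps[r][c]) for (r, c) in comp))
--     if not sums:
--         sums.append(-1)
--     return sorted(sums)
-- ===== Notes on version B (the rewrite author's own statement) =====
-- stated objective: alternative
-- what changed: Replaces the queue-based BFS flood fill with per-region fixed-point saturation: each region is grown as a whole set (frontierless closure iteration with an early-stability break) over a visited set of coordinate pairs instead of a 0/1 matrix with a deque, and the region sum is taken over the finished set rather than accumulated during traversal.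
import Mathlib
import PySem

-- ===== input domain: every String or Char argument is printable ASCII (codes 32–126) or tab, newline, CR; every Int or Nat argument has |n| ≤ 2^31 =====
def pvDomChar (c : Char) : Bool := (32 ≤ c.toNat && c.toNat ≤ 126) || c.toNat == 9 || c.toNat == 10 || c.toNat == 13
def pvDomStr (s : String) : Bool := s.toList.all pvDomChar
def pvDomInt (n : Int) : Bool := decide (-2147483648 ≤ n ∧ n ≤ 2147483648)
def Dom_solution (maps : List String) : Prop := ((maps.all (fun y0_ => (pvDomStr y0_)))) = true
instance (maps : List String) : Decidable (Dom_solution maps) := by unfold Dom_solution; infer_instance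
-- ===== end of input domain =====

-- B replaces A's deque-BFS flood fill over a 0/1 visited matrix by whole-set fixed-point
-- saturation of each region over a visited set of coordinate pairs (objective: alternative).

-- ===== PORT A =====
-- shared accessors: both Pythons read maps[i][j] (a one-char string) and int() of it
def cellD (maps : List String) (i j : Int) : Char :=
  match PySem.List.pyGet? maps i with
  | none => 'X'
  | some s => (PySem.Str.pyGet? s j).getD 'X'

def digD (c : Char) : Int := (PySem.Int.ofChars? [c]).getD 0

-- v[i][j] with default 1 (= "visited") outside the matrix; A only reads it under 0 ≤ i < n ∧ 0 ≤ j < m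
def vgetD (v : List (List Int)) (i j : Int) : Int :=
  match PySem.List.pyGet? v i with
  | none => 1
  | some row => (PySem.List.pyGet? row j).getD 1

-- v[i][j] = 1
def vset1 (v : List (List Int)) (i j : Int) : List (List Int) :=
  match PySem.List.pyGet? v i with
  | none => v
  | some row => PySem.List.pySetD v i (PySem.List.pySetD row j 1)

-- number of still-unvisited entries of v: the BFS termination measure
def zeros (v : List (List Int)) : Nat := (v.map (fun row => row.count 0)).sum

theorem count_set_zero (row : List Int) (k : Nat) (h : row[k]? = some 0) :
    (row.set k 1).count 0 + 1 = row.count 0 := by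
  induction row generalizing k with
  | nil => simp at h
  | cons a t ih =>
    cases k with
    | zero => simp_all
    | succ k =>
      simp only [List.getElem?_cons_succ] at h
      have := ih k h
      simp only [List.set_cons_succ, List.count_cons]
      omega

theorem zeros_set (v : List (List Int)) (k : Nat) (r row : List Int)
    (h : v[k]? = some row) : zeros (v.set k r) + row.count 0 = zeros v + r.count 0 := by
  induction v generalizing k with
  | nil => simp at h
  | cons a t ih =>
    cases k with
    | zero =>
      simp only [List.getElem?_cons_zero, Option.some.injEq] at h
      subst h; simp [zeros]; omega
    | succ k =>
      simp only [List.getElem?_cons_succ] at h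
      have := ih k h
      simp [zeros] at this ⊢; omega

theorem zeros_vset1 (v : List (List Int)) (i j : Int) (h0 : 0 ≤ i) (h1 : 0 ≤ j)
    (h : vgetD v i j = 0) : zeros (vset1 v i j) + 1 = zeros v := by
  unfold vgetD at h
  unfold vset1
  rw [PySem.List.pyGet?_of_nonneg v h0] at h ⊢
  cases hrow : v[i.toNat]? with
  | none => rw [hrow] at h; simp at h
  | some row =>
    rw [hrow] at h
    dsimp only at h
    rw [PySem.List.pyGet?_of_nonneg row h1] at h
    cases hx : row[j.toNat]? with
    | none => rw [hx] at h; simp at h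
    | some x =>
      rw [hx] at h
      simp only [Option.getD_some] at h
      subst h
      dsimp only
      rw [PySem.List.pySetD_of_nonneg v _ h0, PySem.List.pySetD_of_nonneg row _ h1]
      have h1 := zeros_set v i.toNat (row.set j.toNat 1) row hrow
      have h2 := count_set_zero row j.toNat hx
      omega

theorem bfsMeasure_fold {γ : Type} (L : List γ)
    (f : (List (Int × Int) × List (List Int) × Int) → γ → (List (Int × Int) × List (List Int) × Int))
    (h : ∀ st d, 2 * zeros (f st d).2.1 + (f st d).1.length ≤ 2 * zeros st.2.1 + st.1.length)
    (st : List (Int × Int) × List (List Int) × Int) :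
    2 * zeros (L.foldl f st).2.1 + (L.foldl f st).1.length ≤ 2 * zeros st.2.1 + st.1.length := by
  induction L generalizing st with
  | nil => simp
  | cons d L ih => exact le_trans (ih (f st d)) (h st d)

-- the body of A's 'for d in range(4)' neighbour loop
def bfsExpand (maps : List String) (n m cr cc : Int)
    (st : List (Int × Int) × List (List Int) × Int) :
    List (Int × Int) × List (List Int) × Int :=
  (PySem.List.pyRange 0 4 1).foldl (fun st d =>
    let nr := PySem.List.pyGetD [(1 : Int), -1, 0, 0] d 0 + cr
    let nc := PySem.List.pyGetD [(0 : Int), 0, 1, -1] d 0 + cc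
    if 0 ≤ nr ∧ nr < n ∧ 0 ≤ nc ∧ nc < m ∧ vgetD st.2.1 nr nc = 0 ∧ cellD maps nr nc ≠ 'X'
    then (st.1 ++ [(nr, nc)], vset1 st.2.1 nr nc, st.2.2 + digD (cellD maps nr nc))
    else st) st

theorem bfsExpand_measure (maps : List String) (n m cr cc : Int)
    (st : List (Int × Int) × List (List Int) × Int) :
    2 * zeros (bfsExpand maps n m cr cc st).2.1 + (bfsExpand maps n m cr cc st).1.length ≤
      2 * zeros st.2.1 + st.1.length := by
  apply bfsMeasure_fold
  intro st d
  simp only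
  split
  · rename_i hc
    have := zeros_vset1 st.2.1 _ _ hc.1 hc.2.2.1 hc.2.2.2.2.1
    simp; omega
  · exact le_refl _

-- A's inner 'while q:' loop
def bfsLoop (maps : List String) (n m : Int) :
    List (Int × Int) → List (List Int) → Int → List (List Int) × Int
  | [], v, value => (v, value)
  | (cr, cc) :: q, v, value =>
    let st := bfsExpand maps n m cr cc (q, v, value)
    bfsLoop maps n m st.1 st.2.1 st.2.2
termination_by q v _ => 2 * zeros v + q.length
decreasing_by
  have := bfsExpand_measure maps n m cr cc (q, v, value)
  simp at this ⊢; omega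

def solution (maps : List String) : List Int :=
  let n := PySem.List.len maps
  let m := PySem.Str.len ((PySem.List.pyGet? maps 0).getD "")
  let v0 : List (List Int) := (PySem.List.pyRange 0 n 1).map (fun _ => PySem.List.pyRepeat [(0 : Int)] m)
  let st := (PySem.List.pyRange 0 n 1).foldl (fun st i =>
    (PySem.List.pyRange 0 m 1).foldl (fun (st : List (List Int) × List Int) j =>
      if vgetD st.1 i j = 0 ∧ cellD maps i j ≠ 'X' then
        let r := bfsLoop maps n m [(i, j)] (vset1 st.1 i j) (digD (cellD maps i j))
        (r.1, st.2 ++ [r.2])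
      else st) st) (v0, ([] : List Int))
  let ans := if st.2 = [] then [-1] else st.2
  PySem.List.sorted ans (fun x => x) false

-- ===== PORT B =====
def nbrs (r c : Int) : List (Int × Int) := [(r + 1, c), (r - 1, c), (r, c + 1), (r, c - 1)]

-- B's innermost test-and-add
def growStep (maps : List String) (n m : Int) (visited comp : PySem.Set (Int × Int))
    (g : PySem.Set (Int × Int)) (p : Int × Int) : PySem.Set (Int × Int) :=
  if 0 ≤ p.1 ∧ p.1 < n ∧ 0 ≤ p.2 ∧ p.2 < m ∧ p ∉ visited ∧ p ∉ comp ∧ cellD maps p.1 p.2 ≠ 'X'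
  then PySem.Set.add g p else g

-- one whole-set growing pass of B
def grow (maps : List String) (n m : Int) (visited comp : PySem.Set (Int × Int)) :
    PySem.Set (Int × Int) :=
  comp.foldl (fun g rc => (nbrs rc.1 rc.2).foldl (growStep maps n m visited comp) g) comp

-- B's 'for _ in range(n*m): … if grown == comp: break'
def saturate (maps : List String) (n m : Int) (visited : PySem.Set (Int × Int)) :
    Nat → PySem.Set (Int × Int) → PySem.Set (Int × Int)
  | 0, comp => comp
  | Nat.succ k, comp =>
    let grown := grow maps n m visited comp
    if PySem.Set.equal grown comp then comp else saturate maps n m visited k grown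

def solution_alt (maps : List String) : List Int :=
  let n := PySem.List.len maps
  let m := PySem.Str.len ((PySem.List.pyGet? maps 0).getD "")
  let st := (PySem.List.pyRange 0 n 1).foldl (fun st i =>
    (PySem.List.pyRange 0 m 1).foldl (fun (st : PySem.Set (Int × Int) × List Int) j =>
      if (i, j) ∉ st.1 ∧ cellD maps i j ≠ 'X' then
        let comp := saturate maps n m st.1 (n * m).toNat (PySem.Set.ofList [(i, j)])
        (PySem.Set.union st.1 comp, st.2 ++ [(comp.map (fun rc => digD (cellD maps rc.1 rc.2))).sum])
      else st) st) (PySem.Set.empty, ([] : List Int))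
  let ans := if st.2 = [] then [-1] else st.2
  PySem.List.sorted ans (fun x => x) false

-- ===== PRECONDITION & SPEC =====
-- Pre_ excludes exactly the inputs where A raises: an empty maps (IndexError on maps[0]),
-- a row shorter than row 0 (IndexError), or a reachable cell that is neither 'X' nor an
-- ASCII digit (ValueError from int()).
-- (a cell is readable when it is 'X' or an ASCII digit, codes 48-57)
def Pre_solution (maps : List String) : Prop :=
  maps ≠ [] ∧ ∀ s ∈ maps, (maps.headI).toList.length ≤ s.toList.length ∧
    ((s.toList.take (maps.headI).toList.length).all
      fun c => c == 'X' || (48 ≤ c.toNat && c.toNat ≤ 57)) = true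
instance (maps : List String) : Decidable (Pre_solution maps) := by
  unfold Pre_solution; infer_instance

def pvWitness_solution : List String := (["12", "X3"])

def Spec_solution (maps : List String) (out : List Int) : Prop := out = solution_alt maps
instance (maps : List String) (out : List Int) : Decidable (Spec_solution maps out) := by
  unfold Spec_solution; infer_instance

-- ===== CLAIM (what is proved, stated in full; the proofs are below) =====
def Claim_equal_solution : Prop := ∀ (maps : List String), Dom_solution maps → Pre_solution maps → Spec_solution maps (solution maps)


-- ===== LEMMAS AND PROOFS =====

-- cells, bounds, reachability (proof-layer only)
abbrev Cell := Int × Int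

def inb (n m : Int) (p : Cell) : Prop := 0 ≤ p.1 ∧ p.1 < n ∧ 0 ≤ p.2 ∧ p.2 < m

def okc (maps : List String) (n m : Int) (p : Cell) : Prop :=
  inb n m p ∧ cellD maps p.1 p.2 ≠ 'X'

def Mk (n m : Int) (v : List (List Int)) (p : Cell) : Prop :=
  inb n m p ∧ vgetD v p.1 p.2 = 1

def Shape (n m : Int) (v : List (List Int)) : Prop :=
  v.length = n.toNat ∧ ∀ row ∈ v, row.length = m.toNat ∧ ∀ x ∈ row, x = 0 ∨ x = 1

def StepR (maps : List String) (n m : Int) (A : Cell → Prop) (p q : Cell) : Prop :=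
  q ∈ nbrs p.1 p.2 ∧ okc maps n m q ∧ ¬ A q

def Reaches (maps : List String) (n m : Int) (A : Cell → Prop) : Cell → Cell → Prop :=
  Relation.ReflTransGen (StepR maps n m A)

-- ---- matrix facts ----
theorem vget_shape (n m : Int) (v : List (List Int)) (hs : Shape n m v) (p : Cell)
    (hb : inb n m p) : ∃ row, v[p.1.toNat]? = some row ∧ ∃ x, row[p.2.toNat]? = some x ∧
      (x = 0 ∨ x = 1) ∧ vgetD v p.1 p.2 = x := by
  obtain ⟨hb1, hb2, hb3, hb4⟩ := hb
  obtain ⟨hl, hrows⟩ := hs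
  have h1 : p.1.toNat < v.length := by omega
  obtain ⟨hlen, hent⟩ := hrows _ (List.getElem_mem h1)
  have h2 : p.2.toNat < (v[p.1.toNat]).length := by omega
  refine ⟨v[p.1.toNat], List.getElem?_eq_getElem h1, v[p.1.toNat][p.2.toNat],
    List.getElem?_eq_getElem h2, hent _ (List.getElem_mem h2), ?_⟩
  unfold vgetD
  rw [PySem.List.pyGet?_of_nonneg v hb1, List.getElem?_eq_getElem h1]
  dsimp only
  rw [PySem.List.pyGet?_of_nonneg _ hb3, List.getElem?_eq_getElem h2]
  rfl

theorem guard_iff (maps : List String) (n m : Int) (v : List (List Int)) (hs : Shape n m v)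
    (p : Cell) :
    (0 ≤ p.1 ∧ p.1 < n ∧ 0 ≤ p.2 ∧ p.2 < m ∧ vgetD v p.1 p.2 = 0 ∧ cellD maps p.1 p.2 ≠ 'X')
      ↔ (okc maps n m p ∧ ¬ Mk n m v p) := by
  constructor
  · rintro ⟨h1, h2, h3, h4, h5, h6⟩
    refine ⟨⟨⟨h1, h2, h3, h4⟩, h6⟩, ?_⟩
    rintro ⟨-, hv⟩
    rw [h5] at hv; exact absurd hv (by decide)
  · rintro ⟨⟨⟨h1, h2, h3, h4⟩, h6⟩, hnm⟩
    obtain ⟨row, hr, x, hx, hx01, hveq⟩ := vget_shape n m v hs p ⟨h1, h2, h3, h4⟩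
    refine ⟨h1, h2, h3, h4, ?_, h6⟩
    rcases hx01 with h0 | h0
    · rw [hveq, h0]
    · exact absurd ⟨⟨h1, h2, h3, h4⟩, by rw [hveq, h0]⟩ hnm

theorem vget_vset1 (n m : Int) (v : List (List Int)) (hs : Shape n m v) (p : Cell)
    (hb : inb n m p) (x : Cell) (hx : inb n m x) :
    vgetD (vset1 v p.1 p.2) x.1 x.2 = if x = p then 1 else vgetD v x.1 x.2 := by
  obtain ⟨hb1, hb2, hb3, hb4⟩ := hb
  obtain ⟨hx1, hx2, hx3, hx4⟩ := hx
  obtain ⟨hl, hrows⟩ := hs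
  have h1 : p.1.toNat < v.length := by omega
  obtain ⟨hlen, -⟩ := hrows _ (List.getElem_mem h1)
  have h2 : p.2.toNat < (v[p.1.toNat]).length := by omega
  unfold vset1
  rw [PySem.List.pyGet?_of_nonneg v hb1, List.getElem?_eq_getElem h1]
  dsimp only
  rw [PySem.List.pySetD_of_nonneg v _ hb1, PySem.List.pySetD_of_nonneg _ _ hb3]
  unfold vgetD
  rw [PySem.List.pyGet?_of_nonneg _ hx1, PySem.List.pyGet?_of_nonneg v hx1]
  by_cases e1 : x.1.toNat = p.1.toNat
  · rw [e1, List.getElem?_set_self (by omega), List.getElem?_eq_getElem h1]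
    dsimp only
    rw [PySem.List.pyGet?_of_nonneg (v[p.1.toNat].set p.2.toNat 1) hx3,
        PySem.List.pyGet?_of_nonneg (v[p.1.toNat]) hx3]
    by_cases e2 : x.2.toNat = p.2.toNat
    · have hxp : x = p := Prod.ext (by omega) (by omega)
      rw [if_pos hxp, e2, List.getElem?_set_self (by omega)]
      rfl
    · have hxp : x ≠ p := by intro h; subst h; exact e2 rfl
      rw [if_neg hxp, List.getElem?_set_ne (by omega)]
  · have hxp : x ≠ p := by intro h; subst h; exact e1 rfl
    rw [if_neg hxp, List.getElem?_set_ne (by omega)]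

theorem shape_vset1 (n m : Int) (v : List (List Int)) (hs : Shape n m v) (p : Cell)
    (hb : inb n m p) : Shape n m (vset1 v p.1 p.2) := by
  obtain ⟨hb1, hb2, hb3, hb4⟩ := hb
  obtain ⟨hl, hrows⟩ := hs
  have h1 : p.1.toNat < v.length := by omega
  unfold vset1
  rw [PySem.List.pyGet?_of_nonneg v hb1, List.getElem?_eq_getElem h1]
  dsimp only
  rw [PySem.List.pySetD_of_nonneg v _ hb1, PySem.List.pySetD_of_nonneg _ _ hb3]
  constructor
  · rw [List.length_set]; exact hl
  · intro row hrow
    rcases List.mem_or_eq_of_mem_set hrow with h | h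
    · exact hrows _ h
    · subst h
      obtain ⟨hlen, hent⟩ := hrows _ (List.getElem_mem h1)
      refine ⟨by rw [List.length_set]; exact hlen, ?_⟩
      intro y hy
      rcases List.mem_or_eq_of_mem_set hy with h | h
      · exact hent _ h
      · right; exact h

theorem mk_vset1 (n m : Int) (v : List (List Int)) (hs : Shape n m v) (p : Cell)
    (hb : inb n m p) (x : Cell) : Mk n m (vset1 v p.1 p.2) x ↔ Mk n m v x ∨ x = p := by
  by_cases hx : inb n m x
  · have hv := vget_vset1 n m v hs p hb x hx
    unfold Mk
    rw [hv]
    by_cases e : x = p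
    · simp [e, hb]
    · simp [e, hx]
  · constructor
    · rintro ⟨h, -⟩; exact absurd h hx
    · rintro (⟨h, -⟩ | h)
      · exact absurd h hx
      · subst h; exact absurd hb hx

-- ---- the expansion of one BFS node ----
def bstep (maps : List String) (n m : Int)
    (st : List Cell × List (List Int) × Int) (p : Cell) : List Cell × List (List Int) × Int :=
  if 0 ≤ p.1 ∧ p.1 < n ∧ 0 ≤ p.2 ∧ p.2 < m ∧ vgetD st.2.1 p.1 p.2 = 0 ∧ cellD maps p.1 p.2 ≠ 'X'
  then (st.1 ++ [p], vset1 st.2.1 p.1 p.2, st.2.2 + digD (cellD maps p.1 p.2))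
  else st

theorem nbrs_nodup (r c : Int) : (nbrs r c).Nodup := by
  simp [nbrs, Prod.ext_iff]
  omega

theorem bfsExpand_eq (maps : List String) (n m cr cc : Int)
    (st : List Cell × List (List Int) × Int) :
    bfsExpand maps n m cr cc st = (nbrs cr cc).foldl (bstep maps n m) st := by
  have h1 : PySem.List.pyRange 0 4 1 = [(0 : Int), 1, 2, 3] := by decide
  have h2 : [(0 : Int), 1, 2, 3].map (fun d =>
      (PySem.List.pyGetD [(1 : Int), -1, 0, 0] d 0 + cr,
       PySem.List.pyGetD [(0 : Int), 0, 1, -1] d 0 + cc)) = nbrs cr cc := by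
    simp only [List.map, nbrs]
    norm_num [PySem.List.pyGetD, PySem.List.pyGet?, PySem.List.pyIdx?, Prod.ext_iff]
    norm_num [show ((2 : Int).toNat) = 2 from rfl, show ((3 : Int).toNat) = 3 from rfl]
    omega
  unfold bfsExpand
  rw [h1, ← h2, List.foldl_map]
  rfl

def newOf (maps : List String) (n m : Int) (v : List (List Int)) (L : List Cell) : List Cell :=
  L.filter (fun p => decide
    (0 ≤ p.1 ∧ p.1 < n ∧ 0 ≤ p.2 ∧ p.2 < m ∧ vgetD v p.1 p.2 = 0 ∧ cellD maps p.1 p.2 ≠ 'X'))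

theorem mem_newOf (maps : List String) (n m : Int) (v : List (List Int)) (hs : Shape n m v)
    (L : List Cell) (x : Cell) :
    x ∈ newOf maps n m v L ↔ x ∈ L ∧ okc maps n m x ∧ ¬ Mk n m v x := by
  unfold newOf
  rw [List.mem_filter]
  simp only [decide_eq_true_eq]
  rw [guard_iff maps n m v hs x]

theorem expand_fold_spec (maps : List String) (n m : Int) :
    ∀ (L : List Cell), L.Nodup → ∀ (q : List Cell) (v : List (List Int)) (val : Int),
    Shape n m v →
    ∃ V', L.foldl (bstep maps n m) (q, v, val) =
        (q ++ newOf maps n m v L, V',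
         val + ((newOf maps n m v L).map (fun p => digD (cellD maps p.1 p.2))).sum) ∧
      Shape n m V' ∧ (∀ x, Mk n m V' x ↔ Mk n m v x ∨ x ∈ newOf maps n m v L) := by
  intro L
  induction L with
  | nil =>
    intro _ q v val hs
    exact ⟨v, by simp [newOf], hs, fun x => by simp [newOf]⟩
  | cons p L ih =>
    intro hnd q v val hs
    obtain ⟨hp, hndL⟩ := List.nodup_cons.mp hnd
    rw [List.foldl_cons]
    by_cases hg : 0 ≤ p.1 ∧ p.1 < n ∧ 0 ≤ p.2 ∧ p.2 < m ∧ vgetD v p.1 p.2 = 0 ∧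
        cellD maps p.1 p.2 ≠ 'X'
    · have hokm := (guard_iff maps n m v hs p).mp hg
      have hinb : inb n m p := hokm.1.1
      have hs1 : Shape n m (vset1 v p.1 p.2) := shape_vset1 n m v hs p hinb
      have hmk1 := mk_vset1 n m v hs p hinb
      have hb : bstep maps n m (q, v, val) p =
          (q ++ [p], vset1 v p.1 p.2, val + digD (cellD maps p.1 p.2)) := by
        unfold bstep; rw [if_pos hg]
      rw [hb]
      obtain ⟨V', heq, hsV, hmkV⟩ := ih hndL (q ++ [p]) (vset1 v p.1 p.2)
        (val + digD (cellD maps p.1 p.2)) hs1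
      have hfc : newOf maps n m (vset1 v p.1 p.2) L = newOf maps n m v L := by
        unfold newOf
        apply List.filter_congr
        intro y hy
        have hyp : y ≠ p := by intro h; subst h; exact hp hy
        apply decide_eq_decide.mpr
        rw [guard_iff maps n m (vset1 v p.1 p.2) hs1 y, guard_iff maps n m v hs y,
          hmk1 y]
        constructor
        · rintro ⟨hok, hno⟩; exact ⟨hok, fun h => hno (Or.inl h)⟩
        · rintro ⟨hok, hno⟩
          refine ⟨hok, ?_⟩
          rintro (h | h)
          · exact hno h
          · exact hyp h
      have hcons : newOf maps n m v (p :: L) = p :: newOf maps n m v L := by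
        unfold newOf
        rw [List.filter_cons, if_pos (by simpa using hg)]
      rw [hfc] at heq hmkV
      refine ⟨V', ?_, hsV, ?_⟩
      · rw [heq, hcons]
        simp only [List.map_cons, List.sum_cons, List.append_assoc, List.singleton_append]
        rw [add_assoc]
      · intro x
        rw [hmkV x, hmk1 x, hcons]
        simp only [List.mem_cons]
        tauto
    · have hb : bstep maps n m (q, v, val) p = (q, v, val) := by
        unfold bstep; rw [if_neg hg]
      have hcons : newOf maps n m v (p :: L) = newOf maps n m v L := by
        unfold newOf
        rw [List.filter_cons, if_neg (by simpa using hg)]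
      rw [hb, hcons]
      exact ih hndL q v val hs

-- ---- reachability facts ----
theorem reaches_congr (maps : List String) (n m : Int) (A B : Cell → Prop)
    (h : ∀ q, A q ↔ B q) (s x : Cell) :
    Reaches maps n m A s x ↔ Reaches maps n m B s x := by
  constructor <;> intro hr
  · exact Relation.ReflTransGen.mono
      (fun a b hab => ⟨hab.1, hab.2.1, fun hb => hab.2.2 ((h b).mpr hb)⟩) hr
  · exact Relation.ReflTransGen.mono
      (fun a b hab => ⟨hab.1, hab.2.1, fun hb => hab.2.2 ((h b).mp hb)⟩) hr

theorem reaches_last (maps : List String) (n m : Int) (A : Cell → Prop) (s x : Cell)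
    (h : Reaches maps n m A s x) : x = s ∨ (okc maps n m x ∧ ¬ A x) := by
  induction h with
  | refl => left; rfl
  | tail _ hstep _ => right; exact ⟨hstep.2.1, hstep.2.2⟩

theorem reaches_split (maps : List String) (n m : Int) (A : Cell → Prop) (N : List Cell)
    (s x : Cell) (h : Reaches maps n m A s x) :
    Reaches maps n m (fun q => A q ∨ q ∈ N) s x ∨
      ∃ t ∈ N, Reaches maps n m (fun q => A q ∨ q ∈ N) t x := by
  induction h with
  | refl => left; exact Relation.ReflTransGen.refl
  | @tail b c _ hstep ih =>
    by_cases hc : c ∈ N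
    · right; exact ⟨c, hc, Relation.ReflTransGen.refl⟩
    · have hstep' : StepR maps n m (fun q => A q ∨ q ∈ N) b c := by
        refine ⟨hstep.1, hstep.2.1, ?_⟩
        rintro (h | h)
        · exact hstep.2.2 h
        · exact hc h
      rcases ih with h | ⟨t, ht, hr⟩
      · left; exact h.tail hstep'
      · right; exact ⟨t, ht, hr.tail hstep'⟩

theorem reach_expand (maps : List String) (n m : Int) (A : Cell → Prop) (c : Cell)
    (hc : A c) (N : List Cell)
    (hN : ∀ p, p ∈ N ↔ (p ∈ nbrs c.1 c.2 ∧ okc maps n m p ∧ ¬ A p)) (q' : List Cell)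
    (x : Cell) :
    (A x ∨ ∃ s ∈ c :: q', Reaches maps n m A s x) ↔
      ((A x ∨ x ∈ N) ∨ ∃ s ∈ q' ++ N, Reaches maps n m (fun y => A y ∨ y ∈ N) s x) := by
  constructor
  · rintro (hA | ⟨s, hsmem, hr⟩)
    · exact Or.inl (Or.inl hA)
    · rcases reaches_split maps n m A N s x hr with hr' | ⟨t, ht, hr'⟩
      · rcases List.mem_cons.mp hsmem with hsc | hsq
        · subst hsc
          rcases Relation.ReflTransGen.cases_head hr' with hxc | ⟨y, hy, -⟩
          · subst hxc; exact Or.inl (Or.inl hc)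
          · exact absurd ((hN y).mpr ⟨hy.1, hy.2.1, fun hA' => hy.2.2 (Or.inl hA')⟩)
              (fun hyN => hy.2.2 (Or.inr hyN))
        · exact Or.inr ⟨s, List.mem_append_left _ hsq, hr'⟩
      · exact Or.inr ⟨t, List.mem_append_right _ ht, hr'⟩
  · rintro ((hA | hxN) | ⟨s, hsm, hr⟩)
    · exact Or.inl hA
    · obtain ⟨h1, h2, h3⟩ := (hN x).mp hxN
      exact Or.inr ⟨c, List.mem_cons_self, Relation.ReflTransGen.single ⟨h1, h2, h3⟩⟩
    · have hr' : Reaches maps n m A s x :=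
        Relation.ReflTransGen.mono
          (fun a b hab => ⟨hab.1, hab.2.1, fun hA' => hab.2.2 (Or.inl hA')⟩) hr
      rcases List.mem_append.mp hsm with hsq | hsN
      · exact Or.inr ⟨s, List.mem_cons_of_mem _ hsq, hr'⟩
      · obtain ⟨h1, h2, h3⟩ := (hN s).mp hsN
        exact Or.inr ⟨c, List.mem_cons_self,
          Relation.ReflTransGen.trans (Relation.ReflTransGen.single ⟨h1, h2, h3⟩) hr'⟩

-- ---- BFS computes the closure ----
theorem bfsLoop_unfold_nil (maps : List String) (n m : Int) (v : List (List Int)) (val : Int) :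
    bfsLoop maps n m [] v val = (v, val) := by unfold bfsLoop; rfl

theorem bfsLoop_unfold_cons (maps : List String) (n m cr cc : Int) (q : List Cell)
    (v : List (List Int)) (val : Int) :
    bfsLoop maps n m ((cr, cc) :: q) v val =
      bfsLoop maps n m (bfsExpand maps n m cr cc (q, v, val)).1
        (bfsExpand maps n m cr cc (q, v, val)).2.1
        (bfsExpand maps n m cr cc (q, v, val)).2.2 := by
  conv_lhs => unfold bfsLoop

theorem bfsLoop_spec (maps : List String) (n m : Int) :
    ∀ (q : List Cell) (v : List (List Int)) (val : Int), Shape n m v →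
    (∀ s ∈ q, Mk n m v s) →
    ∃ C : List Cell, C.Nodup ∧
      (∀ x, x ∈ C ↔ (¬ Mk n m v x ∧ ∃ s ∈ q, Reaches maps n m (Mk n m v) s x)) ∧
      Shape n m (bfsLoop maps n m q v val).1 ∧
      (∀ x, Mk n m (bfsLoop maps n m q v val).1 x ↔ Mk n m v x ∨ x ∈ C) ∧
      (bfsLoop maps n m q v val).2 =
        val + (C.map (fun p => digD (cellD maps p.1 p.2))).sum := by
  suffices H : ∀ (k : Nat) (q : List Cell) (v : List (List Int)) (val : Int),
      2 * zeros v + q.length ≤ k → Shape n m v → (∀ s ∈ q, Mk n m v s) →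
      ∃ C : List Cell, C.Nodup ∧
        (∀ x, x ∈ C ↔ (¬ Mk n m v x ∧ ∃ s ∈ q, Reaches maps n m (Mk n m v) s x)) ∧
        Shape n m (bfsLoop maps n m q v val).1 ∧
        (∀ x, Mk n m (bfsLoop maps n m q v val).1 x ↔ Mk n m v x ∨ x ∈ C) ∧
        (bfsLoop maps n m q v val).2 =
          val + (C.map (fun p => digD (cellD maps p.1 p.2))).sum by
    exact fun q v val hs hq => H (2 * zeros v + q.length) q v val le_rfl hs hq
  intro k
  induction k with
  | zero =>
    intro q v val hk hs hq
    have hq0 : q = [] := by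
      cases q with
      | nil => rfl
      | cons a t => simp at hk
    subst hq0
    rw [bfsLoop_unfold_nil]
    exact ⟨[], by simp, fun x => by simp, hs, fun x => by simp, by simp⟩
  | succ k ih =>
    intro q v val hk hs hq
    match q with
    | [] =>
      rw [bfsLoop_unfold_nil]
      exact ⟨[], by simp, fun x => by simp, hs, fun x => by simp, by simp⟩
    | (cr, cc) :: q₂ =>
      rw [bfsLoop_unfold_cons]
      obtain ⟨V₁, heq, hsV₁, hmkV₁⟩ :=
        expand_fold_spec maps n m (nbrs cr cc) (nbrs_nodup cr cc) q₂ v val hs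
      have hμ := bfsExpand_measure maps n m cr cc (q₂, v, val)
      rw [bfsExpand_eq, heq] at hμ
      rw [bfsExpand_eq, heq]
      set N := newOf maps n m v (nbrs cr cc) with hNdef
      have hNiff : ∀ p, p ∈ N ↔ (p ∈ nbrs cr cc ∧ okc maps n m p ∧ ¬ Mk n m v p) := by
        intro p
        rw [hNdef, mem_newOf maps n m v hs]
      have hNnd : N.Nodup := List.Nodup.filter _ (nbrs_nodup cr cc)
      have hmarked : ∀ s ∈ q₂ ++ N, Mk n m V₁ s := by
        intro s hsm
        rcases List.mem_append.mp hsm with h | h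
        · exact (hmkV₁ s).mpr (Or.inl (hq s (List.mem_cons_of_mem _ h)))
        · exact (hmkV₁ s).mpr (Or.inr h)
      have hlen : 2 * zeros V₁ + (q₂ ++ N).length ≤ k := by
        simp only [List.length_cons] at hk
        dsimp only at hμ
        omega
      obtain ⟨C₂, hC₂nd, hC₂mem, hCsh, hCmk, hCval⟩ :=
        ih (q₂ ++ N) V₁ (val + (N.map (fun p => digD (cellD maps p.1 p.2))).sum) hlen
          hsV₁ hmarked
      have hcong : ∀ s x, Reaches maps n m (Mk n m V₁) s x ↔
          Reaches maps n m (fun y => Mk n m v y ∨ y ∈ N) s x :=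
        fun s x => reaches_congr maps n m _ _ hmkV₁ s x
      have hRE := reach_expand maps n m (Mk n m v) (cr, cc)
        (hq _ List.mem_cons_self) N hNiff q₂
      refine ⟨N ++ C₂, ?_, ?_, hCsh, ?_, ?_⟩
      · refine List.Nodup.append hNnd hC₂nd ?_
        intro x hxN hxC
        have := ((hC₂mem x).mp hxC).1
        exact this ((hmkV₁ x).mpr (Or.inr hxN))
      · intro x
        rw [List.mem_append]
        constructor
        · rintro (hxN | hxC)
          · obtain ⟨h1, h2, h3⟩ := (hNiff x).mp hxN
            exact ⟨h3, (cr, cc), List.mem_cons_self, Relation.ReflTransGen.single ⟨h1, h2, h3⟩⟩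
          · obtain ⟨hnMk, hex⟩ := (hC₂mem x).mp hxC
            have hnv : ¬ Mk n m v x := fun h => hnMk ((hmkV₁ x).mpr (Or.inl h))
            refine ⟨hnv, ?_⟩
            have : (Mk n m v x ∨ x ∈ N) ∨
                ∃ s ∈ q₂ ++ N, Reaches maps n m (fun y => Mk n m v y ∨ y ∈ N) s x := by
              right
              obtain ⟨s, hsm, hr⟩ := hex
              exact ⟨s, hsm, (hcong s x).mp hr⟩
            rcases (hRE x).mpr this with h | h
            · exact absurd h hnv
            · exact h
        · rintro ⟨hnv, hex⟩
          by_cases hxN : x ∈ N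
          · exact Or.inl hxN
          · right
            rcases (hRE x).mp (Or.inr hex) with (h | h) | ⟨s, hsm, hr⟩
            · exact absurd h hnv
            · exact absurd h hxN
            · refine (hC₂mem x).mpr ⟨?_, s, hsm, (hcong s x).mpr hr⟩
              intro h
              rcases (hmkV₁ x).mp h with h' | h'
              · exact hnv h'
              · exact hxN h'
      · intro x
        rw [hCmk x, hmkV₁ x, List.mem_append]
        tauto
      · rw [hCval, List.map_append, List.sum_append]
        ring

-- ---- B's growing pass ----
def gguard (maps : List String) (n m : Int) (visited comp : PySem.Set Cell) (p : Cell) : Prop :=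
  0 ≤ p.1 ∧ p.1 < n ∧ 0 ≤ p.2 ∧ p.2 < m ∧ p ∉ visited ∧ p ∉ comp ∧ cellD maps p.1 p.2 ≠ 'X'

theorem foldl_growStep_spec (maps : List String) (n m : Int) (visited comp : PySem.Set Cell) :
    ∀ (L : List Cell) (g : PySem.Set Cell), g.Nodup →
    ∃ ext, L.foldl (growStep maps n m visited comp) g = g ++ ext ∧
      (L.foldl (growStep maps n m visited comp) g).Nodup ∧
      (∀ x, x ∈ L.foldl (growStep maps n m visited comp) g ↔
        x ∈ g ∨ (x ∈ L ∧ gguard maps n m visited comp x)) := by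
  intro L
  induction L with
  | nil => intro g hg; exact ⟨[], by simp, by simpa using hg, fun x => by simp⟩
  | cons p L ih =>
    intro g hg
    rw [List.foldl_cons]
    by_cases hgu : gguard maps n m visited comp p
    · have hstep : growStep maps n m visited comp g p = PySem.Set.add g p := by
        unfold growStep; exact if_pos hgu
      rw [hstep]
      obtain ⟨ext, he, hnd, hmem⟩ := ih (PySem.Set.add g p) (PySem.Set.nodup_add g p hg)
      refine ⟨(if p ∈ g then ([] : List Cell) else [p]) ++ ext, ?_, hnd, ?_⟩
      · rw [he, PySem.Set.add_eq_ite]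
        by_cases hpg : p ∈ g
        · rw [if_pos hpg, if_pos hpg]; simp
        · rw [if_neg hpg, if_neg hpg]; simp
      · intro x
        rw [hmem x, PySem.Set.mem_add]
        simp only [List.mem_cons]
        constructor
        · rintro ((hxg | hxp) | ⟨hxL, hG⟩)
          · exact Or.inl hxg
          · subst hxp; exact Or.inr ⟨Or.inl rfl, hgu⟩
          · exact Or.inr ⟨Or.inr hxL, hG⟩
        · rintro (hxg | ⟨(hxp | hxL), hG⟩)
          · exact Or.inl (Or.inl hxg)
          · subst hxp; exact Or.inl (Or.inr rfl)
          · exact Or.inr ⟨hxL, hG⟩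
    · have hstep : growStep maps n m visited comp g p = g := by
        unfold growStep; exact if_neg hgu
      rw [hstep]
      obtain ⟨ext, he, hnd, hmem⟩ := ih g hg
      refine ⟨ext, he, hnd, ?_⟩
      intro x
      rw [hmem x]
      simp only [List.mem_cons]
      constructor
      · rintro (hxg | ⟨hxL, hG⟩)
        · exact Or.inl hxg
        · exact Or.inr ⟨Or.inr hxL, hG⟩
      · rintro (hxg | ⟨(hxp | hxL), hG⟩)
        · exact Or.inl hxg
        · subst hxp; exact absurd hG hgu
        · exact Or.inr ⟨hxL, hG⟩

theorem grow_spec (maps : List String) (n m : Int) (visited comp : PySem.Set Cell)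
    (hnd : comp.Nodup) :
    ∃ ext, grow maps n m visited comp = comp ++ ext ∧
      (grow maps n m visited comp).Nodup ∧
      (∀ x, x ∈ grow maps n m visited comp ↔
        x ∈ comp ∨ ∃ c ∈ comp, x ∈ nbrs c.1 c.2 ∧ gguard maps n m visited comp x) := by
  have hflat : ∀ (cs : List Cell) (g : PySem.Set Cell),
      cs.foldl (fun g rc => (nbrs rc.1 rc.2).foldl (growStep maps n m visited comp) g) g =
        (cs.flatMap (fun rc => nbrs rc.1 rc.2)).foldl (growStep maps n m visited comp) g := by
    intro cs
    induction cs with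
    | nil => intro g; simp
    | cons c cs ih =>
      intro g
      rw [List.foldl_cons, List.flatMap_cons, List.foldl_append, ih]
  have hgrow : grow maps n m visited comp =
      (comp.flatMap (fun rc => nbrs rc.1 rc.2)).foldl (growStep maps n m visited comp) comp := by
    unfold grow; exact hflat comp comp
  obtain ⟨ext, he, hnd, hmem⟩ :=
    foldl_growStep_spec maps n m visited comp (comp.flatMap (fun rc => nbrs rc.1 rc.2)) comp hnd
  rw [hgrow]
  refine ⟨ext, he, hnd, ?_⟩
  intro x
  rw [hmem x, List.mem_flatMap]
  constructor
  · rintro (h | ⟨⟨c, hc, hn⟩, hG⟩)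
    · exact Or.inl h
    · exact Or.inr ⟨c, hc, hn, hG⟩
  · rintro (h | ⟨c, hc, hn, hG⟩)
    · exact Or.inl h
    · exact Or.inr ⟨⟨c, hc, hn⟩, hG⟩

-- ---- saturation: soundness, and closedness by the counting argument ----
theorem sat_sound (maps : List String) (n m : Int) (visited : PySem.Set Cell)
    (P : Cell → Prop)
    (hP : ∀ c p, P c → p ∈ nbrs c.1 c.2 → inb n m p → cellD maps p.1 p.2 ≠ 'X' →
            p ∉ visited → P p) :
    ∀ (fuel : Nat) (comp : PySem.Set Cell), comp.Nodup → (∀ x ∈ comp, P x) →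
      ∀ x ∈ saturate maps n m visited fuel comp, P x := by
  intro fuel
  induction fuel with
  | zero => intro comp _ hcomp; exact hcomp
  | succ k ih =>
    intro comp hnd hcomp
    unfold saturate
    obtain ⟨ext, hge, hgnd, hgmem⟩ := grow_spec maps n m visited comp hnd
    by_cases he : PySem.Set.equal (grow maps n m visited comp) comp = true
    · rw [if_pos he]; exact hcomp
    · rw [if_neg he]
      apply ih (grow maps n m visited comp) hgnd
      intro x hx
      rcases (hgmem x).mp hx with h | ⟨c, hc, hn, hG⟩
      · exact hcomp x h
      · exact hP c x (hcomp c hc) hn ⟨hG.1, hG.2.1, hG.2.2.1, hG.2.2.2.1⟩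
          hG.2.2.2.2.2.2 hG.2.2.2.2.1

def gridL (n m : Int) : List Cell :=
  (PySem.List.pyRange 0 n 1).flatMap (fun i => (PySem.List.pyRange 0 m 1).map (fun j => (i, j)))

theorem gridL_mem (n m : Int) (p : Cell) : p ∈ gridL n m ↔ inb n m p := by
  obtain ⟨a, b⟩ := p
  constructor
  · intro h
    obtain ⟨i, hi, hmem⟩ := List.mem_flatMap.mp h
    obtain ⟨j, hj, hpe⟩ := List.mem_map.mp hmem
    obtain ⟨h1, h2⟩ := PySem.List.mem_pyRange_one.mp hi
    obtain ⟨h3, h4⟩ := PySem.List.mem_pyRange_one.mp hj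
    cases hpe
    exact ⟨h1, h2, h3, h4⟩
  · rintro ⟨h1, h2, h3, h4⟩
    exact List.mem_flatMap.mpr ⟨a, PySem.List.mem_pyRange_one.mpr ⟨h1, h2⟩,
      List.mem_map.mpr ⟨b, PySem.List.mem_pyRange_one.mpr ⟨h3, h4⟩, rfl⟩⟩

theorem gridL_length (n m : Int) : (gridL n m).length = n.toNat * m.toNat := by
  rw [gridL, List.length_flatMap]
  have : ∀ i : Int, ((PySem.List.pyRange 0 m 1).map (fun j => (i, j))).length = m.toNat := by
    intro i
    rw [List.length_map, PySem.List.length_pyRange_one]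
    norm_num
  rw [List.map_congr_left (fun i _ => this i), List.map_const', List.sum_replicate,
    PySem.List.length_pyRange_one]
  norm_num

theorem sat_closed (maps : List String) (n m : Int) (visited : PySem.Set Cell) :
    ∀ (fuel : Nat) (comp : PySem.Set Cell), comp.Nodup → (∀ x ∈ comp, inb n m x) →
    n.toNat * m.toNat + 1 ≤ fuel + comp.length →
    (saturate maps n m visited fuel comp).Nodup ∧
    (∀ x ∈ comp, x ∈ saturate maps n m visited fuel comp) ∧
    (∀ x ∈ saturate maps n m visited fuel comp, inb n m x) ∧
    (∀ c ∈ saturate maps n m visited fuel comp, ∀ p, p ∈ nbrs c.1 c.2 →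
      okc maps n m p → p ∉ visited → p ∈ saturate maps n m visited fuel comp) := by
  intro fuel
  induction fuel with
  | zero =>
    intro comp hnd hinb hcount
    exfalso
    have hsub : comp ⊆ gridL n m := fun x hx => (gridL_mem n m x).mpr (hinb x hx)
    have hle := (hnd.subperm hsub).length_le
    rw [gridL_length] at hle
    omega
  | succ k ih =>
    intro comp hnd hinb hcount
    unfold saturate
    obtain ⟨ext, hge, hgnd, hgmem⟩ := grow_spec maps n m visited comp hnd
    by_cases he : PySem.Set.equal (grow maps n m visited comp) comp = true
    · rw [if_pos he]
      have hiff := (PySem.Set.equal_iff _ _).mp he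
      refine ⟨hnd, fun x hx => hx, hinb, ?_⟩
      intro c hc p hpn hok hpv
      by_cases hpc : p ∈ comp
      · exact hpc
      · refine (hiff p).mp ((hgmem p).mpr (Or.inr ⟨c, hc, hpn, ?_⟩))
        exact ⟨hok.1.1, hok.1.2.1, hok.1.2.2.1, hok.1.2.2.2, hpv, hpc, hok.2⟩
    · rw [if_neg he]
      have hext : ext ≠ [] := by
        rintro rfl
        apply he
        rw [PySem.Set.equal_iff]
        intro x
        rw [hge]
        simp
      have hlen : comp.length + 1 ≤ (grow maps n m visited comp).length := by
        rw [hge, List.length_append]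
        cases ext with
        | nil => exact absurd rfl hext
        | cons a t => simp
      have hginb : ∀ x ∈ grow maps n m visited comp, inb n m x := by
        intro x hx
        rcases (hgmem x).mp hx with h | ⟨c, hc, hn, hG⟩
        · exact hinb x h
        · exact ⟨hG.1, hG.2.1, hG.2.2.1, hG.2.2.2.1⟩
      obtain ⟨hnd', hsup, hinb', hcl⟩ := ih (grow maps n m visited comp) hgnd hginb (by omega)
      exact ⟨hnd', fun x hx => hsup x ((hgmem x).mpr (Or.inl hx)), hinb', hcl⟩

theorem reach_in_closed (maps : List String) (n m : Int) (A : Cell → Prop) (S : List Cell)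
    (hcl : ∀ c ∈ S, ∀ p, p ∈ nbrs c.1 c.2 → okc maps n m p → ¬ A p → p ∈ S)
    (s x : Cell) (hs : s ∈ S) (h : Reaches maps n m A s x) : x ∈ S := by
  induction h with
  | refl => exact hs
  | @tail b c _ hstep ih => exact hcl b ih c hstep.1 hstep.2.1 hstep.2.2

-- ---- generic two-fold lockstep ----
theorem foldl_rel {γ σ τ : Type} (R : σ → τ → Prop) (l : List γ)
    (f : σ → γ → σ) (g : τ → γ → τ)
    (h : ∀ s t x, x ∈ l → R s t → R (f s x) (g t x)) :
    ∀ (s : σ) (t : τ), R s t → R (l.foldl f s) (l.foldl g t) := by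
  induction l with
  | nil => intro s t hst; exact hst
  | cons a l ih =>
    intro s t hst
    rw [List.foldl_cons, List.foldl_cons]
    exact ih (fun s t x hx => h s t x (List.mem_cons_of_mem _ hx)) _ _
      (h s t a List.mem_cons_self hst)

-- ---- the per-cell step of the two outer scans agrees ----
def LockInv (n m : Int) (sa : List (List Int) × List Int) (sb : PySem.Set Cell × List Int) : Prop :=
  Shape n m sa.1 ∧ sb.1.Nodup ∧ (∀ x, Mk n m sa.1 x ↔ x ∈ sb.1) ∧ sa.2 = sb.2

theorem cell_step (maps : List String) (n m : Int) (hn : n.toNat * m.toNat = (n * m).toNat)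
    (i j : Int) (hi : 0 ≤ i ∧ i < n) (hj : 0 ≤ j ∧ j < m)
    (sa : List (List Int) × List Int) (sb : PySem.Set Cell × List Int)
    (hR : LockInv n m sa sb) :
    LockInv n m
      (if vgetD sa.1 i j = 0 ∧ cellD maps i j ≠ 'X' then
        ((bfsLoop maps n m [(i, j)] (vset1 sa.1 i j) (digD (cellD maps i j))).1,
         sa.2 ++ [(bfsLoop maps n m [(i, j)] (vset1 sa.1 i j) (digD (cellD maps i j))).2])
       else sa)
      (if (i, j) ∉ sb.1 ∧ cellD maps i j ≠ 'X' then
        (PySem.Set.union sb.1 (saturate maps n m sb.1 (n * m).toNat (PySem.Set.ofList [(i, j)])),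
         sb.2 ++ [((saturate maps n m sb.1 (n * m).toNat (PySem.Set.ofList [(i, j)])).map
            (fun rc => digD (cellD maps rc.1 rc.2))).sum])
       else sb) := by
  obtain ⟨hsh, hbnd, hmk, hans⟩ := hR
  have hinbij : inb n m (i, j) := ⟨hi.1, hi.2, hj.1, hj.2⟩
  obtain ⟨row, hrw, xv, hxv, hx01, hveq⟩ := vget_shape n m sa.1 hsh (i, j) hinbij
  dsimp only at hveq
  have h1 : vgetD sa.1 i j = 0 ↔ ¬ Mk n m sa.1 (i, j) := by
    unfold Mk
    dsimp only
    rw [hveq]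
    rcases hx01 with h | h <;> subst h <;> simp [hinbij]
  have guardAB : (vgetD sa.1 i j = 0 ∧ cellD maps i j ≠ 'X') ↔
      ((i, j) ∉ sb.1 ∧ cellD maps i j ≠ 'X') := by
    rw [h1, hmk]
  by_cases hg : vgetD sa.1 i j = 0 ∧ cellD maps i j ≠ 'X'
  · rw [if_pos hg, if_pos (guardAB.mp hg)]
    have hnotmk : ¬ Mk n m sa.1 (i, j) := h1.mp hg.1
    have hs1 : Shape n m (vset1 sa.1 i j) := shape_vset1 n m sa.1 hsh (i, j) hinbij
    have hmk1 : ∀ x, Mk n m (vset1 sa.1 i j) x ↔ Mk n m sa.1 x ∨ x = (i, j) :=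
      mk_vset1 n m sa.1 hsh (i, j) hinbij
    obtain ⟨C, hCnd, hCmem, hCsh, hCmk, hCval⟩ :=
      bfsLoop_spec maps n m [(i, j)] (vset1 sa.1 i j) (digD (cellD maps i j)) hs1
        (by
          intro s hsm
          obtain rfl : s = (i, j) := by simpa using hsm
          exact (hmk1 (i, j)).mpr (Or.inr rfl))
    have hof : PySem.Set.ofList [((i : Int), (j : Int))] = [(i, j)] :=
      PySem.Set.ofList_eq_self_of_nodup [((i : Int), (j : Int))] (List.nodup_singleton _)
    obtain ⟨hsnD, hsup, hsinb, hscl⟩ :=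
      sat_closed maps n m sb.1 (n * m).toNat (PySem.Set.ofList [(i, j)])
        (by rw [hof]; exact List.nodup_singleton _)
        (by
          intro x hx
          rw [hof] at hx
          obtain rfl : x = (i, j) := by simpa using hx
          exact hinbij)
        (by rw [hof]; simp; omega)
    set sat := saturate maps n m sb.1 (n * m).toNat (PySem.Set.ofList [(i, j)]) with hsatdef
    have hstart : (i, j) ∈ sat := hsup (i, j) (by rw [hof]; exact List.mem_cons_self)
    have hA'mk : ∀ y, Mk n m (vset1 sa.1 i j) y ↔ (y ∈ sb.1 ∨ y = (i, j)) := by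
      intro y
      rw [hmk1 y, hmk y]
    have hPcl : ∀ c p, (c = (i, j) ∨ Reaches maps n m (fun y => y ∈ sb.1 ∨ y = (i, j)) (i, j) c) →
        p ∈ nbrs c.1 c.2 → inb n m p → cellD maps p.1 p.2 ≠ 'X' → p ∉ sb.1 →
        (p = (i, j) ∨ Reaches maps n m (fun y => y ∈ sb.1 ∨ y = (i, j)) (i, j) p) := by
      intro c p hc hpn hpb hpX hpv
      by_cases hps : p = (i, j)
      · exact Or.inl hps
      · right
        have hstep : StepR maps n m (fun y => y ∈ sb.1 ∨ y = (i, j)) c p := by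
          refine ⟨hpn, ⟨hpb, hpX⟩, ?_⟩
          rintro (h | h)
          · exact hpv h
          · exact hps h
        rcases hc with rfl | hr
        · exact Relation.ReflTransGen.single hstep
        · exact hr.tail hstep
    have hsound := sat_sound maps n m sb.1 _ hPcl (n * m).toNat (PySem.Set.ofList [(i, j)])
      (by rw [hof]; exact List.nodup_singleton _)
      (by
        intro x hx
        rw [hof] at hx
        obtain rfl : x = (i, j) := by simpa using hx
        exact Or.inl rfl)
    have hcompl : ∀ x, (x = (i, j) ∨ Reaches maps n m (fun y => y ∈ sb.1 ∨ y = (i, j)) (i, j) x) →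
        x ∈ sat := by
      rintro x (rfl | hr)
      · exact hstart
      · exact reach_in_closed maps n m _ sat
          (fun c hc p hpn hok hnA => hscl c hc p hpn hok (fun hv => hnA (Or.inl hv)))
          (i, j) x hstart hr
    have hmemsat : ∀ x, x ∈ sat ↔ x = (i, j) ∨ x ∈ C := by
      intro x
      constructor
      · intro hx
        rcases hsound x hx with rfl | hr
        · exact Or.inl rfl
        · by_cases hxs : x = (i, j)
          · exact Or.inl hxs
          · right
            rw [hCmem x]
            have hrx := (reaches_congr maps n m _ _ (fun q => (hA'mk q).symm) (i, j) x).mp hr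
            refine ⟨?_, (i, j), List.mem_cons_self, hrx⟩
            rcases reaches_last maps n m _ _ _ hrx with h | h
            · exact absurd h hxs
            · exact h.2
      · rintro (rfl | hxC)
        · exact hstart
        · obtain ⟨hnmk, s, hsm, hr⟩ := (hCmem x).mp hxC
          obtain rfl : s = (i, j) := by simpa using hsm
          exact hcompl x (Or.inr ((reaches_congr maps n m _ _ hA'mk (i, j) x).mp hr))
    have hijC : (i, j) ∉ C := by
      intro h
      exact ((hCmem _).mp h).1 ((hmk1 (i, j)).mpr (Or.inr rfl))
    have hperm : sat.Perm ((i, j) :: C) := by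
      rw [List.perm_ext_iff_of_nodup hsnD (List.nodup_cons.mpr ⟨hijC, hCnd⟩)]
      intro a
      rw [hmemsat a, List.mem_cons]
    have hsum : (sat.map (fun rc => digD (cellD maps rc.1 rc.2))).sum =
        digD (cellD maps i j) + (C.map (fun p => digD (cellD maps p.1 p.2))).sum := by
      rw [(hperm.map (fun rc => digD (cellD maps rc.1 rc.2))).sum_eq]
      simp
    refine ⟨hCsh, PySem.Set.nodup_union sb.1 sat hbnd, ?_, ?_⟩
    · intro x
      dsimp only
      rw [hCmk x, hmk1 x, hmk x, PySem.Set.mem_union, hmemsat x]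
      tauto
    · dsimp only
      rw [hans, hCval, hsum]
  · rw [if_neg hg, if_neg (fun h => hg (guardAB.mpr h))]
    exact ⟨hsh, hbnd, hmk, hans⟩

-- ===== VERDICT (by name: the statement is the Claim_ definition above) =====
theorem solution_spec : Claim_equal_solution := by
  intro maps _ _
  unfold Spec_solution solution solution_alt
  dsimp only
  set n := PySem.List.len maps with hn
  set m := PySem.Str.len ((PySem.List.pyGet? maps 0).getD "") with hm
  have hn0 : 0 ≤ n := by rw [hn, PySem.List.len_eq]; exact Int.natCast_nonneg _
  have hm0 : 0 ≤ m := by rw [hm, PySem.Str.len_eq]; exact Int.natCast_nonneg _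
  have hnm : n.toNat * m.toNat = (n * m).toNat := by
    conv_rhs => rw [← Int.toNat_of_nonneg hn0, ← Int.toNat_of_nonneg hm0]
    rw [← Nat.cast_mul, Int.toNat_natCast]
  set v0 := (PySem.List.pyRange 0 n 1).map (fun _ => PySem.List.pyRepeat [(0 : Int)] m)
    with hv0
  have hsh0 : Shape n m v0 := by
    constructor
    · rw [hv0, List.length_map, PySem.List.length_pyRange_one]; norm_num
    · intro row hrow
      rw [hv0] at hrow
      obtain ⟨iI, -, rfl⟩ := List.mem_map.mp hrow
      rw [PySem.List.pyRepeat_singleton]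
      refine ⟨List.length_replicate, ?_⟩
      intro x hx
      exact Or.inl (List.eq_of_mem_replicate hx)
  have hmk0 : ∀ x, Mk n m v0 x ↔ x ∈ (PySem.Set.empty : PySem.Set Cell) := by
    intro x
    constructor
    · rintro ⟨hinbx, hv1⟩
      exfalso
      obtain ⟨row, hr, xv, hxv, -, hveq⟩ := vget_shape n m v0 hsh0 x hinbx
      have hrow := List.mem_of_getElem? hr
      rw [hv0] at hrow
      obtain ⟨iI, -, rfl⟩ := List.mem_map.mp hrow
      have hxv' := List.mem_of_getElem? hxv
      rw [PySem.List.pyRepeat_singleton] at hxv'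
      have hx0 : xv = 0 := List.eq_of_mem_replicate hxv'
      rw [hveq, hx0] at hv1
      exact absurd hv1 (by decide)
    · intro hx
      exact absurd hx (List.not_mem_nil)
  have hinit : LockInv n m (v0, ([] : List Int)) (PySem.Set.empty, ([] : List Int)) :=
    ⟨hsh0, List.nodup_nil, hmk0, rfl⟩
  have hmain := foldl_rel (LockInv n m) (PySem.List.pyRange 0 n 1) _ _
    (fun sa sb i hi hR =>
      foldl_rel (LockInv n m) (PySem.List.pyRange 0 m 1) _ _
        (fun sa' sb' j hj hR' =>
          cell_step maps n m hnm i j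
            (by have := PySem.List.mem_pyRange_one.mp hi; exact ⟨this.1, this.2⟩)
            (by have := PySem.List.mem_pyRange_one.mp hj; exact ⟨this.1, this.2⟩)
            sa' sb' hR')
        sa sb hR)
    (v0, ([] : List Int)) (PySem.Set.empty, ([] : List Int)) hinit
  have hans := hmain.2.2.2
  rw [hans]
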